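-- pv_equiv track=rewrite | github.com/mberrien-fitzsimons/recipe_recommendation_system | src/d03_models/crf_model_baskets.py | product_tagger
-- ===== SOURCE A (Python) =====
-- def product_tagger(product_sentence_tokens, product_label_sentence):
--     pre = []
--     food = []
--     post = []
--
--     for word, label in zip(product_sentence_tokens, product_label_sentence):
--         if label == 'pre':
--             pre.append(word.lower())
--         if label == 'food':
--             food.append(word.lower())
--         if label == 'post':
--             post.append(word.lower())
--     return {'pre': " ".join(pre), 'food': " ".join(food), 'post': " ".join(post)}
-- ===== SOURCE B (Python) =====
-- def product_tagger(product_sentence_tokens, product_label_sentence):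
--     pairs = list(zip(product_sentence_tokens, product_label_sentence))
--     return {k: " ".join(w.lower() for w, l in pairs if l == k)
--             for k in ('pre', 'food', 'post')}
-- ===== Notes on version B (the rewrite author's own statement) =====
-- stated objective: idiomatic
-- what changed: Replaces the single dispatching loop with three accumulator lists by a dict comprehension over the fixed keys, each value built by a filtered scan of the materialised zip.
import Mathlib
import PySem

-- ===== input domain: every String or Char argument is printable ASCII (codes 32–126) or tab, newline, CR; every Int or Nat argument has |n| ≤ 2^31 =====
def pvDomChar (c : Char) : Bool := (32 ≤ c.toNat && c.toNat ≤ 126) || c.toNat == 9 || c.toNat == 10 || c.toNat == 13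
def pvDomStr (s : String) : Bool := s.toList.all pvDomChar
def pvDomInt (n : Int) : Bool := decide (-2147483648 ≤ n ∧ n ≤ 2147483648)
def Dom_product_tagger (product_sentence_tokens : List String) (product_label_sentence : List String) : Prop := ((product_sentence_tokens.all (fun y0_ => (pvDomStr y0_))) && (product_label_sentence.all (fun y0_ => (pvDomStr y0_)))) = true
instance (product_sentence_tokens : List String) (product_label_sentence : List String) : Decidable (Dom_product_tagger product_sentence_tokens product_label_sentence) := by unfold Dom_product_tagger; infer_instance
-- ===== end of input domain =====

-- B replaces A's single dispatching loop with a comprehension over the fixed keys, each built by a filtered scan of the zipped pairs (idiomatic; same cost).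

-- ===== PORT A =====
-- the loop body of A's for-loop (the three independent ifs, in order)
def ptStep (acc : List String × List String × List String) (wl : String × String) : List String × List String × List String :=
  let acc := if wl.2 == "pre" then (acc.1 ++ [PySem.Str.lower wl.1], acc.2.1, acc.2.2) else acc
  let acc := if wl.2 == "food" then (acc.1, acc.2.1 ++ [PySem.Str.lower wl.1], acc.2.2) else acc
  let acc := if wl.2 == "post" then (acc.1, acc.2.1, acc.2.2 ++ [PySem.Str.lower wl.1]) else acc
  acc

def product_tagger (product_sentence_tokens : List String) (product_label_sentence : List String) : List (String × String) :=
  let st := (List.zip product_sentence_tokens product_label_sentence).foldl ptStep ([], [], [])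
  [("pre", PySem.Str.join " " st.1), ("food", PySem.Str.join " " st.2.1), ("post", PySem.Str.join " " st.2.2)]

-- ===== PORT B =====
def product_tagger_alt (product_sentence_tokens : List String) (product_label_sentence : List String) : List (String × String) :=
  let pairs := List.zip product_sentence_tokens product_label_sentence
  ["pre", "food", "post"].map (fun k =>
    (k, PySem.Str.join " " ((pairs.filter (fun wl => wl.2 == k)).map (fun wl => PySem.Str.lower wl.1))))

-- ===== PRECONDITION & SPEC =====
def Spec_product_tagger (product_sentence_tokens : List String) (product_label_sentence : List String) (out : List (String × String)) : Prop := out = product_tagger_alt product_sentence_tokens product_label_sentence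
instance (product_sentence_tokens : List String) (product_label_sentence : List String) (out : List (String × String)) : Decidable (Spec_product_tagger product_sentence_tokens product_label_sentence out) := by unfold Spec_product_tagger; infer_instance

-- ===== CLAIM (what is proved, stated in full; the proofs are below) =====
def Claim_equal_product_tagger : Prop := ∀ (product_sentence_tokens : List String) (product_label_sentence : List String), Dom_product_tagger product_sentence_tokens product_label_sentence → Spec_product_tagger product_sentence_tokens product_label_sentence (product_tagger product_sentence_tokens product_label_sentence)

-- ===== LEMMAS AND PROOFS =====

-- A's fold appends to its three accumulators exactly the lowered words of the pairs labelled 'pre'/'food'/'post', in order.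
theorem pt_fold_eq (l : List (String × String)) (p f q : List String) :
    l.foldl ptStep (p, f, q)
    = (p ++ (l.filter (fun wl => wl.2 == "pre")).map (fun wl => PySem.Str.lower wl.1),
       f ++ (l.filter (fun wl => wl.2 == "food")).map (fun wl => PySem.Str.lower wl.1),
       q ++ (l.filter (fun wl => wl.2 == "post")).map (fun wl => PySem.Str.lower wl.1)) := by
  induction l generalizing p f q with
  | nil => simp
  | cons hd tl ih =>
    simp only [List.foldl_cons, List.filter_cons, List.map]
    by_cases h1 : hd.2 == "pre" <;> by_cases h2 : hd.2 == "food" <;> by_cases h3 : hd.2 == "post" <;>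
      simp_all [ptStep, ih, List.append_assoc]

-- ===== VERDICT (by name: the statement is the Claim_ definition above) =====
theorem product_tagger_spec : Claim_equal_product_tagger := by
  intro toks labs _
  unfold Spec_product_tagger product_tagger product_tagger_alt
  simp [pt_fold_eq]
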